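-- pv_equiv track=rewrite | github.com/nimirium/snippets | kakuro/kakuro.py | _get_cell_groups
-- ===== SOURCE A (Python) =====
-- def _get_cell_groups(row):
--     groups = []
--     cur_group = []
--     for cell in row:
--         if cell != 'x':
--             cur_group.append(cell)
--         else:
--             if cur_group:
--                 groups.append(cur_group)
--             cur_group = []
--     if cur_group:
--         groups.append(cur_group)
--     return groups
-- ===== SOURCE B (Python) =====
-- def _get_cell_groups(row):
--     cuts = [-1] + [i for i, cell in enumerate(row) if cell == 'x'] + [len(row)]
--     return [row[a + 1:b] for a, b in zip(cuts, cuts[1:]) if b - a > 1]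
-- ===== Notes on version B (the rewrite author's own statement) =====
-- stated objective: alternative
-- what changed: B works in two stages over indices instead of streaming cells: it first computes the list of separator positions (indices of 'x', with sentinels -1 and len(row)), then zips adjacent cut positions and slices the row between each pair that encloses a non-empty segment; no per-cell accumulator or flush branch exists.
import Mathlib
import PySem

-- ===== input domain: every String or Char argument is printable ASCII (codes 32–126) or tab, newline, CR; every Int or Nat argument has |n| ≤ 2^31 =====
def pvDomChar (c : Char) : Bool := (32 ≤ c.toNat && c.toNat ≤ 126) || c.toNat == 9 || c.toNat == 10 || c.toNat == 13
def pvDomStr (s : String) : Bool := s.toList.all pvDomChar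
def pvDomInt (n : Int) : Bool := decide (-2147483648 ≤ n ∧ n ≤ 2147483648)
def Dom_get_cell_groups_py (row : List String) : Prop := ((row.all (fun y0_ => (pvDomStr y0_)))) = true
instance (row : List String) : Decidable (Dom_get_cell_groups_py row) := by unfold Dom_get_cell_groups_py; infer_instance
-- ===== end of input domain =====

-- B replaces A's streaming accumulator loop by a two-stage index computation: collect the 'x' cut
-- positions (with sentinels -1 and len), then slice the row between adjacent cuts; alternative, same cost.


-- ===== PORT A =====
-- step of A's for-loop over the state (groups, cur_group)
def pvStepA (s : List (List String) × List String) (cell : String) : List (List String) × List String :=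
  if cell ≠ "x" then (s.1, s.2 ++ [cell])
  else if s.2 ≠ [] then (s.1 ++ [s.2], ([] : List String))
  else (s.1, [])

def get_cell_groups_py (row : List String) : List (List String) :=
  let st := row.foldl pvStepA (([] : List (List String)), ([] : List String))
  if st.2 ≠ [] then st.1 ++ [st.2] else st.1

-- ===== PORT B =====
-- cuts = [-1] + [i for i, cell in enumerate(row) if cell == 'x'] + [len(row)]
-- return [row[a+1:b] for a, b in zip(cuts, cuts[1:]) if b - a > 1]
def get_cell_groups_py_alt (row : List String) : List (List String) :=
  let cuts : List Int :=
    [-1] ++ ((PySem.List.enumerate row 0).filter (fun p => p.2 == "x")).map (fun p => p.1)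
         ++ [(row.length : Int)]
  ((cuts.zip (PySem.List.slice cuts (some 1) none)).filter (fun p => p.2 - p.1 > 1)).map
    (fun p => PySem.List.slice row (some (p.1 + 1)) (some p.2))

-- ===== PRECONDITION & SPEC =====
def Spec_get_cell_groups_py (row : List String) (out : List (List String)) : Prop := out = get_cell_groups_py_alt row
instance (row : List String) (out : List (List String)) : Decidable (Spec_get_cell_groups_py row out) := by unfold Spec_get_cell_groups_py; infer_instance

-- ===== CLAIM (what is proved, stated in full; the proofs are below) =====
def Claim_equal_get_cell_groups_py : Prop := ∀ (row : List String), Dom_get_cell_groups_py row → Spec_get_cell_groups_py row (get_cell_groups_py row)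

-- ===== LEMMAS AND PROOFS =====

-- canonical runs function: both ports are proved equal to it
def pvRuns : List String → List (List String)
  | [] => []
  | c :: rest =>
    if c == "x" then
      pvRuns (rest.dropWhile (· == "x"))
    else
      (c :: rest.takeWhile (· ≠ "x")) :: pvRuns (rest.dropWhile (· ≠ "x"))
  termination_by row => row.length
  decreasing_by
    · exact Nat.lt_succ_of_le (List.length_dropWhile_le _ _)
    · exact Nat.lt_succ_of_le (List.length_dropWhile_le _ _)

-- A's tail (unfolding of the fold from a running state)
def pvAux (cur : List String) : List String → List (List String)
  | [] => if cur ≠ [] then [cur] else []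
  | c :: r =>
    if c ≠ "x" then pvAux (cur ++ [c]) r
    else if cur ≠ [] then cur :: pvAux [] r else pvAux [] r

lemma pvFold_eq_aux (row : List String) (gs : List (List String)) (cur : List String) :
    (let st := row.foldl pvStepA (gs, cur)
     if st.2 ≠ [] then st.1 ++ [st.2] else st.1) = gs ++ pvAux cur row := by
  induction row generalizing gs cur with
  | nil =>
    simp only [List.foldl, pvAux]
    split <;> simp
  | cons c r ih =>
    simp only [List.foldl, pvStepA, pvAux]
    by_cases hc : c ≠ "x"
    · rw [if_pos hc, if_pos hc]
      exact ih gs (cur ++ [c])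
    · rw [if_neg hc, if_neg hc]
      by_cases hcur : cur ≠ []
      · rw [if_pos hcur, if_pos hcur]
        rw [ih (gs ++ [cur]) []]
        simp
      · rw [if_neg hcur, if_neg hcur]
        exact ih gs []

lemma pvRuns_cons_x (r : List String) : pvRuns ("x" :: r) = pvRuns r := by
  rw [pvRuns]
  simp only [beq_self_eq_true, if_true]
  match r with
  | [] => simp
  | c :: r' =>
    by_cases hc : c = "x"
    · subst hc
      have : List.dropWhile (· == "x") ("x" :: r') = List.dropWhile (· == "x") r' := by
        simp [List.dropWhile]
      rw [this]
      conv_rhs => rw [pvRuns]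
      simp
    · have hce : (c == "x") = false := by simp [hc]
      have : List.dropWhile (· == "x") (c :: r') = c :: r' := by
        rw [List.dropWhile]
        simp only [hce]
      rw [this]

lemma pvAux_eq (row : List String) : ∀ (cur : List String),
    pvAux cur row = if cur = [] then pvRuns row
      else (cur ++ row.takeWhile (· ≠ "x")) :: pvRuns (row.dropWhile (· ≠ "x")) := by
  induction row with
  | nil =>
    intro cur
    by_cases h : cur = [] <;> simp [pvAux, h, pvRuns]
  | cons c r ih =>
    intro cur
    by_cases hc : c = "x"
    · subst hc
      have hx : ¬ (("x" : String) ≠ "x") := by simp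
      rw [pvAux, if_neg hx]
      have htw : List.takeWhile (· ≠ "x") ("x" :: r) = [] := by simp [List.takeWhile]
      have hdw : List.dropWhile (· ≠ "x") ("x" :: r) = "x" :: r := by simp [List.dropWhile]
      by_cases h : cur = []
      · rw [if_neg (by simpa using h), ih [], if_pos rfl, if_pos h, pvRuns_cons_x]
      · rw [if_pos h, ih [], if_pos rfl, if_neg h, htw, hdw, pvRuns_cons_x]
        simp
    · have hc' : (c ≠ "x") := hc
      rw [pvAux, if_pos hc', ih (cur ++ [c]), if_neg (by simp)]
      have htw : List.takeWhile (· ≠ "x") (c :: r) = c :: List.takeWhile (· ≠ "x") r := by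
        simp [List.takeWhile, hc]
      have hdw : List.dropWhile (· ≠ "x") (c :: r) = List.dropWhile (· ≠ "x") r := by
        simp [List.dropWhile, hc]
      by_cases h : cur = []
      · subst h
        rw [if_pos rfl]
        rw [pvRuns]
        simp only [show (c == "x") = false by simp [hc], Bool.false_eq_true, if_false]
        simp
      · rw [if_neg h, htw, hdw]
        simp

lemma pvA_eq_runs (row : List String) : get_cell_groups_py row = pvRuns row := by
  unfold get_cell_groups_py
  rw [pvFold_eq_aux row [] [], pvAux_eq row [], if_pos rfl]
  simp

-- B-side abbreviations
def pvSeps (s : Int) (row : List String) : List Int :=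
  ((PySem.List.enumerate row s).filter (fun p => p.2 == "x")).map (fun p => p.1)

def pvCuts (row : List String) : List Int := -1 :: (pvSeps 0 row ++ [(row.length : Int)])

def pvBody (row : List String) (cuts : List Int) : List (List String) :=
  ((cuts.zip cuts.tail).filter (fun p => p.2 - p.1 > 1)).map
    (fun p => PySem.List.slice row (some (p.1 + 1)) (some p.2))

lemma pvB_eq_body (row : List String) : get_cell_groups_py_alt row = pvBody row (pvCuts row) := by
  unfold get_cell_groups_py_alt
  simp only [PySem.List.slice_from_one]
  rfl

lemma pvBody_cons (row : List String) (a b : Int) (t : List Int) :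
    pvBody row (a :: b :: t)
      = (if b - a > 1 then [PySem.List.slice row (some (a + 1)) (some b)] else [])
        ++ pvBody row (b :: t) := by
  unfold pvBody
  simp only [List.zip, List.zipWith, List.tail, List.filter]
  by_cases h : b - a > 1
  · simp [h]
  · simp [h]

lemma pvSeps_cons (s : Int) (c : String) (r : List String) :
    pvSeps s (c :: r) = (if c = "x" then [s] else []) ++ pvSeps (s + 1) r := by
  unfold pvSeps
  rw [PySem.List.enumerate_cons]
  by_cases h : c = "x"
  · simp [h]
  · simp [h]

lemma pvSeps_append (s : Int) (xs t : List String) :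
    pvSeps s (xs ++ t) = pvSeps s xs ++ pvSeps (s + xs.length) t := by
  unfold pvSeps
  rw [PySem.List.enumerate_append, List.filter_append, List.map_append]

lemma pvSeps_shift (row : List String) : ∀ (s t : Int),
    pvSeps s row = (pvSeps t row).map (· + (s - t)) := by
  induction row with
  | nil => intro s t; simp [pvSeps, PySem.List.enumerate_nil]
  | cons c r ih =>
    intro s t
    rw [pvSeps_cons, pvSeps_cons, List.map_append]
    congr 1
    · by_cases h : c = "x"
      · simp only [h, if_true]
        have : t + (s - t) = s := by ring
        simp [this]
      · simp [h]
    · rw [ih (s + 1) (t + 1)]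
      have : s + 1 - (t + 1) = s - t := by ring
      rw [this]

lemma pvSeps_bounds (row : List String) (x : Int) (hx : x ∈ pvSeps 0 row) :
    0 ≤ x ∧ x < (row.length : Int) := by
  unfold pvSeps at hx
  simp only [List.mem_map, List.mem_filter] at hx
  obtain ⟨p, ⟨hp, _⟩, rfl⟩ := hx
  rw [PySem.List.mem_enumerate_iff] at hp
  obtain ⟨k, hk, rfl⟩ := hp
  constructor
  · simp
  · simp
    omega

lemma pvSeps_nil_of_no_x (row : List String) (h : ∀ c ∈ row, c ≠ "x") :
    pvSeps 0 row = [] := by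
  unfold pvSeps
  rw [List.filter_eq_nil_iff.mpr, List.map_nil]
  intro p hp
  rw [PySem.List.mem_enumerate_iff] at hp
  obtain ⟨k, hk, rfl⟩ := hp
  simpa using h _ (List.getElem_mem hk)

lemma pvSeps_append_x (u v : List String) (hu : ∀ c ∈ u, c ≠ "x") :
    pvSeps 0 (u ++ "x" :: v)
      = (u.length : Int) :: (pvSeps 0 v).map (· + ((u.length : Int) + 1)) := by
  rw [pvSeps_append, pvSeps_nil_of_no_x u hu, List.nil_append, pvSeps_cons]
  rw [pvSeps_shift v (0 + (u.length : Int) + 1) 0]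
  have h1 : (0 : Int) + (u.length : Int) + 1 - 0 = (u.length : Int) + 1 := by ring
  have h2 : (0 : Int) + (u.length : Int) = (u.length : Int) := by ring
  rw [h1, h2]
  simp

lemma pvCuts_bounds (row : List String) (x : Int) (hx : x ∈ pvCuts row) :
    -1 ≤ x ∧ x ≤ (row.length : Int) := by
  unfold pvCuts at hx
  simp only [List.mem_cons, List.mem_append] at hx
  rcases hx with rfl | hx | hx | hx
  · omega
  · have := pvSeps_bounds row x hx
    omega
  · omega
  · simp at hx

lemma pvSlice_shift (w rest : List String) (a b : Int)
    (ha : 0 ≤ a) (hb : 0 ≤ b) :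
    PySem.List.slice (w ++ rest) (some (a + (w.length : Int))) (some (b + (w.length : Int)))
      = PySem.List.slice rest (some a) (some b) := by
  rw [PySem.List.slice_toNat (w ++ rest) (by omega : (0:Int) ≤ a + (w.length : Int))
        (by omega : (0:Int) ≤ b + (w.length : Int)),
      PySem.List.slice_toNat rest ha hb]
  have h1 : (a + (w.length : Int)).toNat = w.length + a.toNat := by omega
  have h2 : (b + (w.length : Int)).toNat - (a + (w.length : Int)).toNat = b.toNat - a.toNat := by
    omega
  rw [h2, h1, List.drop_append]
  rw [List.drop_eq_nil_of_le (by omega : w.length ≤ w.length + a.toNat), List.nil_append,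
      Nat.add_sub_cancel_left]

lemma pvBody_shift (w rest : List String) (cuts : List Int)
    (hc : ∀ x ∈ cuts, -1 ≤ x) :
    pvBody (w ++ rest) (cuts.map (· + (w.length : Int))) = pvBody rest cuts := by
  match cuts with
  | [] => rfl
  | [a] => rfl
  | a :: b :: t =>
    have ha : -1 ≤ a := hc a (by simp)
    have hb : -1 ≤ b := hc b (by simp)
    simp only [List.map_cons]
    rw [pvBody_cons, pvBody_cons]
    have hrec : pvBody (w ++ rest) ((b + (w.length : Int)) :: t.map (· + (w.length : Int)))
        = pvBody rest (b :: t) := by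
      have := pvBody_shift w rest (b :: t) (fun x hx => hc x (List.mem_cons_of_mem a hx))
      simpa using this
    by_cases h : b - a > 1
    · rw [if_pos h, if_pos (by omega)]
      have hsl : PySem.List.slice (w ++ rest) (some (a + (w.length : Int) + 1))
            (some (b + (w.length : Int)))
          = PySem.List.slice rest (some (a + 1)) (some b) := by
        have := pvSlice_shift w rest (a + 1) b (by omega) (by omega)
        rw [show a + (w.length : Int) + 1 = a + 1 + (w.length : Int) by ring]
        exact this
      rw [hsl, hrec]
    · rw [if_neg h, if_neg (by omega)]
      simp only [List.nil_append]
      rw [hrec]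

lemma pvRuns_no_x (row : List String) (h : ∀ c ∈ row, c ≠ "x") :
    pvRuns row = if row = [] then [] else [row] := by
  match row with
  | [] => simp [pvRuns]
  | c :: r =>
    rw [pvRuns]
    have hc : (c == "x") = false := by simpa using h c (by simp)
    simp only [hc, Bool.false_eq_true, if_false]
    have htw : r.takeWhile (· ≠ "x") = r :=
      List.takeWhile_eq_self_iff.mpr (fun x hx => by simpa using h x (by simp [hx]))
    have hdw : r.dropWhile (· ≠ "x") = [] := by
      rw [List.dropWhile_eq_nil_iff]
      intro x hx
      simpa using h x (by simp [hx])
    rw [htw, hdw]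
    simp [pvRuns]

lemma pvRuns_append_x (u v : List String) (hu : ∀ c ∈ u, c ≠ "x") :
    pvRuns (u ++ "x" :: v) = (if u = [] then [] else [u]) ++ pvRuns v := by
  match u with
  | [] => simpa using pvRuns_cons_x v
  | c :: u' =>
    rw [List.cons_append, pvRuns]
    have hc : (c == "x") = false := by simpa using hu c (by simp)
    simp only [hc, Bool.false_eq_true, if_false]
    have h1 : u'.takeWhile (· ≠ "x") = u' :=
      List.takeWhile_eq_self_iff.mpr (fun x hx => by simpa using hu x (by simp [hx]))
    have htw : (u' ++ "x" :: v).takeWhile (· ≠ "x") = u' := by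
      rw [List.takeWhile_append, if_pos (by rw [h1])]
      simp [List.takeWhile]
    have hdw : (u' ++ "x" :: v).dropWhile (· ≠ "x") = "x" :: v := by
      have h2 : u'.dropWhile (· ≠ "x") = [] := by
        rw [List.dropWhile_eq_nil_iff]
        intro x hx
        simpa using hu x (by simp [hx])
      rw [List.dropWhile_append, if_pos (by rw [h2]; rfl)]
      simp [List.dropWhile]
    rw [htw, hdw, pvRuns_cons_x]
    simp

lemma pvCuts_append_x (u v : List String) (hu : ∀ c ∈ u, c ≠ "x") :
    pvCuts (u ++ "x" :: v) = -1 :: (pvCuts v).map (· + ((u.length : Int) + 1)) := by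
  unfold pvCuts
  rw [pvSeps_append_x u v hu]
  simp only [List.map_cons, List.map_append, List.map_nil, List.cons_append]
  rw [show ((-1:Int) + ((u.length : Int) + 1)) = (u.length : Int) by ring,
      show (((u ++ "x" :: v).length : Nat) : Int) = (v.length : Int) + ((u.length : Int) + 1) by
        simp; omega]

lemma pvDropWhile_head {p : String → Bool} : ∀ (l : List String) {x : String} {xs : List String},
    l.dropWhile p = x :: xs → p x = false := by
  intro l
  induction l with
  | nil => intro x xs h; cases h
  | cons c r ih =>
    intro x xs h
    rw [List.dropWhile_cons] at h
    by_cases hp : p c = true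
    · rw [if_pos hp] at h
      exact ih h
    · rw [if_neg hp] at h
      cases h
      simpa using hp

lemma pvMain (n : Nat) : ∀ (row : List String), row.length ≤ n →
    pvBody row (pvCuts row) = pvRuns row := by
  induction n with
  | zero =>
    intro row hlen
    have : row = [] := List.length_eq_zero_iff.mp (Nat.le_zero.mp hlen)
    subst this
    rw [pvRuns]
    decide
  | succ n ih =>
    intro row hlen
    by_cases hx : "x" ∈ row
    · -- row = u ++ "x" :: v with u x-free
      obtain ⟨u, hu_def⟩ : ∃ u, u = row.takeWhile (· ≠ "x") := ⟨_, rfl⟩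
      have hudrop : row.dropWhile (· ≠ "x") ≠ [] := by
        intro h
        rw [List.dropWhile_eq_nil_iff] at h
        simpa using h "x" hx
      obtain ⟨d, v, hdv⟩ := List.exists_cons_of_ne_nil hudrop
      have hd : d = "x" := by
        have := pvDropWhile_head row hdv
        simpa using this
      subst hd
      have hrow : row = u ++ "x" :: v := by
        rw [hu_def, ← hdv, List.takeWhile_append_dropWhile]
      have hu : ∀ c ∈ u, c ≠ "x" := by
        intro c hc
        have := List.mem_takeWhile_imp (hu_def ▸ hc)
        simpa using this
      have hlenv : v.length ≤ n := by
        have : row.length = u.length + 1 + v.length := by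
          rw [hrow]
          simp
          omega
        omega
      rw [hrow, pvCuts_append_x u v hu, pvRuns_append_x u v hu]
      have hcv : pvCuts v = -1 :: (pvSeps 0 v ++ [(v.length : Int)]) := rfl
      rw [hcv, List.map_cons, pvBody_cons]
      have hfirst : (if (-1 + ((u.length : Int) + 1)) - (-1) > 1
            then [PySem.List.slice (u ++ "x" :: v) (some (-1 + 1))
                   (some (-1 + ((u.length : Int) + 1)))] else [])
          = (if u = [] then [] else [u]) := by
        by_cases hue : u = []
        · subst hue
          norm_num
        · have hul : 0 < u.length := List.length_pos_iff.mpr hue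
          rw [if_pos (by omega), if_neg hue]
          have : PySem.List.slice (u ++ "x" :: v) (some (-1 + 1))
              (some (-1 + ((u.length : Int) + 1))) = u := by
            rw [show (-1 : Int) + 1 = ((0 : Nat) : Int) by norm_num,
                show (-1 : Int) + ((u.length : Int) + 1) = ((u.length : Nat) : Int) by omega,
                PySem.List.slice_natCast]
            simp
          rw [this]
      rw [hfirst]
      congr 1
      have hbody : (-1 + ((u.length : Int) + 1)) :: (pvSeps 0 v ++ [(v.length : Int)]).map
            (· + ((u.length : Int) + 1))
          = (pvCuts v).map (· + (((u ++ ["x"]).length : Nat) : Int)) := by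
        rw [hcv, List.map_cons]
        simp
      rw [hbody, show u ++ "x" :: v = (u ++ ["x"]) ++ v by simp,
          pvBody_shift (u ++ ["x"]) v (pvCuts v) (fun x hx => (pvCuts_bounds v x hx).1)]
      exact ih v hlenv
    · -- no 'x' in row
      have hno : ∀ c ∈ row, c ≠ "x" := fun c hc he => hx (he ▸ hc)
      rw [pvRuns_no_x row hno]
      unfold pvCuts
      rw [pvSeps_nil_of_no_x row hno]
      match row with
      | [] => rfl
      | c :: r =>
        rw [List.nil_append, pvBody_cons]
        have hpos : (((c :: r).length : Int)) - (-1) > 1 := by simp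
        rw [if_pos hpos]
        have hsl : PySem.List.slice (c :: r) (some (-1 + 1)) (some ((c :: r).length : Int))
            = c :: r := by
          rw [show (-1 : Int) + 1 = ((0 : Nat) : Int) by norm_num,
              show (((c :: r).length : Nat) : Int) = (((c :: r).length : Nat) : Int) by rfl,
              PySem.List.slice_natCast]
          simp
        rw [hsl]
        simp [pvBody]

-- ===== VERDICT (by name: the statement is the Claim_ definition above) =====
theorem get_cell_groups_py_spec : Claim_equal_get_cell_groups_py := by
  intro row _
  unfold Spec_get_cell_groups_py
  rw [pvA_eq_runs, pvB_eq_body, pvMain row.length row (le_refl _)]
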